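-- pv_equiv track=rewrite | github.com/NamanBhatia-12345/Data_Structures_Algorithms | sol.py | countSentences
-- ===== SOURCE A (Python) =====
-- def countSentences(wordSet,sentences):
--     word_map = {}
--     for word in wordSet:
--         tmp = tuple(sorted(word))
--         word_map[tmp] = word_map.get(tmp, 0) + 1
--     ans = [1] * len(sentences)
--     for i in range(len(sentences)):
--         for word in sentences[i].split():
--             key = tuple(sorted(word))
--             if key in word_map:
--                 ans[i] *= word_map[key]
--     return ans
-- ===== SOURCE B (Python) =====
-- def countSentences(wordSet, sentences):
--     ans = []
--     for sentence in sentences: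
--         # group the sentence's words by their sorted-character signature
--         sig_counts = {}
--         for w in sentence.split():
--             s = ''.join(sorted(w))
--             sig_counts[s] = sig_counts.get(s, 0) + 1
--         prod = 1
--         for s, k in sig_counts.items():
--             m = sum(1 for w in wordSet if ''.join(sorted(w)) == s)
--             if m:
--                 prod *= m ** k
--         ans.append(prod)
--     return ans
-- ===== Notes on version B (the rewrite author's own statement) =====
-- stated objective: alternative
-- what changed: Instead of precomputing a signature-count dict over wordSet and multiplying once per sentence word via an indexed answer array, B groups each sentence's words by signature into a per-sentence counter, then for each distinct signature scans wordSet once and multiplies matches**multiplicity into an accumulator.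
import Mathlib
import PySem

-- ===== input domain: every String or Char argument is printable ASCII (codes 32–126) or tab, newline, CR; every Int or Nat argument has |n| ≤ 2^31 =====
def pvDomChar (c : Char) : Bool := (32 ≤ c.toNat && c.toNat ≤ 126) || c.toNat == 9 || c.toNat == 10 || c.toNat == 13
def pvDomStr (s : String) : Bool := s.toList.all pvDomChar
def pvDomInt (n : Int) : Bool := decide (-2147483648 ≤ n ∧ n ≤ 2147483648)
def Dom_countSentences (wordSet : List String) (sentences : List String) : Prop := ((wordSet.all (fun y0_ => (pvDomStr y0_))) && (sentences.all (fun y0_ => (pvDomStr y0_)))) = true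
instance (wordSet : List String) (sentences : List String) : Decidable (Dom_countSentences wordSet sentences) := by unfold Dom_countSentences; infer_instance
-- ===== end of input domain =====

-- B drops A's precomputed wordSet signature map and per-index answer array: per sentence it groups the
-- sentence's own words by signature into a counter, then for each distinct signature scans wordSet once and
-- multiplies in matches^multiplicity (alternative decomposition, not claimed faster).


-- tuple(sorted(word)) / ''.join(sorted(word)) : the word's character multiset as a sorted list of chars
def pvSig (w : String) : List Char := PySem.List.sorted w.toList (fun c => c) false

-- ===== PORT A =====
def countSentences (wordSet : List String) (sentences : List String) : List Int :=
  (PySem.List.pyRange 0 (sentences.length : Int) 1).foldl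
    (fun ans i =>
      (PySem.Str.split₀ (PySem.List.pyGetD sentences i "")).foldl
        (fun ans word =>
          if (wordSet.foldl (fun d word => d.insert (pvSig word) (d.getD (pvSig word) 0 + 1))
                (PySem.Dict.empty : PySem.Dict (List Char) Int)).contains (pvSig word) then
            PySem.List.pySetD ans i (PySem.List.pyGetD ans i 1 *
              (wordSet.foldl (fun d word => d.insert (pvSig word) (d.getD (pvSig word) 0 + 1))
                (PySem.Dict.empty : PySem.Dict (List Char) Int)).getD (pvSig word) 0)
          else ans)
        ans)
    (List.replicate sentences.length (1 : Int))

-- ===== PORT B =====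
-- sum(1 for w in wordSet if ''.join(sorted(w)) == s)  — a running-sum fold over wordSet (exact)
def pvMatches (wordSet : List String) (s : List Char) : Int :=
  wordSet.foldl (fun acc w => if pvSig w = s then acc + 1 else acc) 0
-- m ** k : counter values are positive ints, so Python's ** is exactly Monoid.npow on the value's toNat
def countSentences_alt (wordSet : List String) (sentences : List String) : List Int :=
  sentences.foldl
    (fun ans sentence =>
      let sig_counts :=
        (PySem.Str.split₀ sentence).foldl
          (fun d w => d.insert (pvSig w) (d.getD (pvSig w) 0 + 1))
          (PySem.Dict.empty : PySem.Dict (List Char) Int)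
      ans ++ [sig_counts.items.foldl
        (fun prod p =>
          if pvMatches wordSet p.1 ≠ 0 then prod * pvMatches wordSet p.1 ^ p.2.toNat else prod)
        1])
    []

-- ===== PRECONDITION & SPEC =====
def Spec_countSentences (wordSet : List String) (sentences : List String) (out : List Int) : Prop := out = countSentences_alt wordSet sentences
instance (wordSet : List String) (sentences : List String) (out : List Int) : Decidable (Spec_countSentences wordSet sentences out) := by unfold Spec_countSentences; infer_instance

-- ===== CLAIM (what is proved, stated in full; the proofs are below) =====
def Claim_equal_countSentences : Prop := ∀ (wordSet : List String) (sentences : List String), Dom_countSentences wordSet sentences → Spec_countSentences wordSet sentences (countSentences wordSet sentences)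

-- ===== LEMMAS AND PROOFS =====

-- count of the signature s among wordSet's signatures, as B's scanning sum computes it
def pvCntW (wordSet : List String) (s : List Char) : Int := ((wordSet.map pvSig).count s : Int)

theorem pv_matches_eq (wordSet : List String) (s : List Char) :
    pvMatches wordSet s = pvCntW wordSet s := by
  unfold pvMatches pvCntW
  suffices h : ∀ (a0 : Int), wordSet.foldl (fun acc w => if pvSig w = s then acc + 1 else acc) a0
      = a0 + ((wordSet.map pvSig).count s : Int) by simpa using h 0
  induction wordSet with
  | nil => simp
  | cons w ws ih =>
    intro a0
    by_cases h : pvSig w = s <;>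
      simp [h, ih]; ring

-- A's word_map / B's sig_counts is the counter of the signatures of the folded list
theorem pv_wm_eq (l : List String) :
    l.foldl (fun d word => d.insert (pvSig word) (d.getD (pvSig word) 0 + 1))
        (PySem.Dict.empty : PySem.Dict (List Char) Int)
      = PySem.Dict.counter (l.map pvSig) := by
  rw [← PySem.Dict.foldl_insert_getD_add_one_eq_counter, List.foldl_map]

-- the "skip-or-multiply" factor both programs use
def pvFac (wordSet : List String) (s : List Char) : Int :=
  if pvCntW wordSet s = 0 then 1 else pvCntW wordSet s

-- a fold multiplying an accumulator is the initial value times the product of the factors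
theorem pv_foldl_mul {α : Type} (f : α → Int) (l : List α) (v0 : Int) :
    l.foldl (fun v x => v * f x) v0 = v0 * (l.map f).prod := by
  induction l generalizing v0 with
  | nil => simp
  | cons x xs ih => simp [ih, mul_assoc]

-- pySetD/pyGetD helpers at an in-range natural index
theorem pv_len_setD (xs : List Int) (n : Nat) (v : Int) :
    (PySem.List.pySetD xs (n : Int) v).length = xs.length := by
  by_cases h : n < xs.length <;> simp [PySem.List.pySetD, PySem.List.pySet?, PySem.List.pyIdx?, h]

theorem pv_get_setD (xs : List Int) (n : Nat) (v : Int) (h : n < xs.length) :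
    PySem.List.pyGetD (PySem.List.pySetD xs (n : Int) v) (n : Int) 1 = v := by
  simp [PySem.List.pySetD, PySem.List.pySet?, PySem.List.pyGetD, PySem.List.pyGet?,
    PySem.List.pyIdx?, h]

theorem pv_set_setD (xs : List Int) (n : Nat) (v w : Int) (h : n < xs.length) :
    PySem.List.pySetD (PySem.List.pySetD xs (n : Int) v) (n : Int) w
      = PySem.List.pySetD xs (n : Int) w := by
  simp [PySem.List.pySetD, PySem.List.pySet?, PySem.List.pyIdx?, h]

theorem pv_set_self (xs : List Int) (n : Nat) (h : n < xs.length) :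
    PySem.List.pySetD xs (n : Int) (PySem.List.pyGetD xs (n : Int) 1) = xs := by
  simp [PySem.List.pySetD, PySem.List.pySet?, PySem.List.pyGetD, PySem.List.pyGet?,
    PySem.List.pyIdx?, h]

theorem pv_get_append (xs : List Int) (y : Int) (ys : List Int) (d : Int) :
    PySem.List.pyGetD (xs ++ y :: ys) (xs.length : Int) d = y := by
  simp [PySem.List.pyGetD, PySem.List.pyGet?, PySem.List.pyIdx?]

theorem pv_set_append (xs : List Int) (y v : Int) (ys : List Int) :
    PySem.List.pySetD (xs ++ y :: ys) (xs.length : Int) v = xs ++ v :: ys := by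
  simp [PySem.List.pySetD, PySem.List.pySet?, PySem.List.pyIdx?]

-- A's inner word loop only touches index i: extract it to a fold over values
theorem pv_inner_extract (c : String → Bool) (m : String → Int) (words : List String) :
    ∀ (ans : List Int) (i : Nat), i < ans.length →
    words.foldl (fun ans word =>
        if c word then
          PySem.List.pySetD ans (i : Int) (PySem.List.pyGetD ans (i : Int) 1 * m word)
        else ans) ans
      = PySem.List.pySetD ans (i : Int)
          (words.foldl (fun v word => if c word then v * m word else v)
            (PySem.List.pyGetD ans (i : Int) 1)) := by
  induction words with
  | nil =>
    intro ans i h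
    simp only [List.foldl_nil]
    exact (pv_set_self ans i h).symm
  | cons word rest ih =>
    intro ans i h
    by_cases hw : c word
    · simp only [List.foldl_cons, if_pos hw]
      rw [ih _ i (by rw [pv_len_setD]; exact h), pv_get_setD _ _ _ h, pv_set_setD _ _ _ _ h]
    · simp only [List.foldl_cons, if_neg hw]
      exact ih ans i h

-- A's outer index loop builds the per-sentence products left to right
theorem pv_loop (c : String → Bool) (m : String → Int) (sentences : List String) (k : Nat) :
    ∀ (done : List Int), done.length + k = sentences.length →
    (PySem.List.pyRange (done.length : Int) (sentences.length : Int) 1).foldl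
      (fun ans i =>
        (PySem.Str.split₀ (PySem.List.pyGetD sentences i "")).foldl
          (fun ans word =>
            if c word then
              PySem.List.pySetD ans i (PySem.List.pyGetD ans i 1 * m word)
            else ans)
          ans)
      (done ++ List.replicate k (1 : Int))
    = done ++ (sentences.drop done.length).map (fun s =>
        (PySem.Str.split₀ s).foldl (fun v word => if c word then v * m word else v) 1) := by
  induction k with
  | zero =>
    intro done hlen
    have hr : (PySem.List.pyRange (done.length : Int) (sentences.length : Int) 1) = [] := by
      simp [PySem.List.pyRange]; omega
    have hd : sentences.drop done.length = [] := List.drop_eq_nil_of_le (by omega)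
    simp [hr, hd]
  | succ k ih =>
    intro done hlen
    have hlt : done.length < sentences.length := by omega
    rw [PySem.List.pyRange_one_cons (by exact_mod_cast hlt)]
    simp only [List.foldl_cons]
    have hs : PySem.List.pyGetD sentences (done.length : Int) ""
        = sentences[done.length] := by
      simp [PySem.List.pyGetD, PySem.List.pyGet?, PySem.List.pyIdx?, hlt]
    have hrep : done ++ List.replicate (k + 1) (1 : Int)
        = done ++ (1 : Int) :: List.replicate k 1 := by simp [List.replicate_succ]
    rw [hrep, pv_inner_extract c m _ _ done.length (by simp), pv_get_append, pv_set_append]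
    have hcons : done ++ ((PySem.Str.split₀ (PySem.List.pyGetD sentences (done.length : Int) "")).foldl
          (fun v word => if c word then v * m word else v) 1) :: List.replicate k 1
        = (done ++ [(PySem.Str.split₀ (PySem.List.pyGetD sentences (done.length : Int) "")).foldl
          (fun v word => if c word then v * m word else v) 1]) ++ List.replicate k 1 := by
      simp
    rw [hcons]
    have hcast : ((done.length : Int) + 1) = (((done ++ [(PySem.Str.split₀ (PySem.List.pyGetD sentences (done.length : Int) "")).foldl
          (fun v word => if c word then v * m word else v) 1]).length : Nat) : Int) := by
      simp
    rw [hcast, ih _ (by simp; omega)]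
    have hdrop : sentences.drop done.length
        = sentences[done.length] :: sentences.drop (done.length + 1) :=
      List.drop_eq_getElem_cons hlt
    simp only [List.length_append, List.length_cons, List.length_nil, hdrop, List.map_cons, hs]
    simp

-- A's per-word multiplier step multiplies by pvFac of the word's signature
theorem pv_step_eq (wordSet : List String) (word : String) (v : Int) :
    (if (PySem.Dict.counter (wordSet.map pvSig)).contains (pvSig word) then
        v * (PySem.Dict.counter (wordSet.map pvSig)).getD (pvSig word) 0 else v)
      = v * pvFac wordSet (pvSig word) := by
  have hget : (PySem.Dict.counter (wordSet.map pvSig)).getD (pvSig word) 0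
      = pvCntW wordSet (pvSig word) := PySem.Dict.getD_counter _ _
  have hmem : (PySem.Dict.counter (wordSet.map pvSig)).contains (pvSig word) = true
      ↔ pvSig word ∈ wordSet.map pvSig := by
    rw [PySem.Dict.contains_iff_mem_keys, PySem.Dict.keys_counter, PySem.Set.mem_ofList]
  by_cases h : pvSig word ∈ wordSet.map pvSig
  · have hne : pvCntW wordSet (pvSig word) ≠ 0 := by
      unfold pvCntW; exact_mod_cast (List.count_pos_iff.mpr h).ne'
    rw [if_pos (hmem.mpr h), hget, pvFac, if_neg hne]
  · have h0 : pvCntW wordSet (pvSig word) = 0 := by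
      unfold pvCntW; simp [List.count_eq_zero, h]
    rw [if_neg (fun hcont => h (hmem.mp hcont)), pvFac, if_pos h0, mul_one]

-- B's foldl-append loop is a map
theorem pv_append_loop (g : String → Int) (l : List String) :
    ∀ acc : List Int, l.foldl (fun ans s => ans ++ [g s]) acc = acc ++ l.map g := by
  induction l with
  | nil => simp
  | cons s rest ih => intro acc; simp [ih]

-- List.count is the same under the two lawful BEq instances on List Char
theorem pv_count_inst (k : List Char) (M : List (List Char)) :
    @List.count (List Char) instBEqOfDecidableEq k M = @List.count (List Char) List.instBEq k M := by
  induction M with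
  | nil => rfl
  | cons a t ih =>
    rw [@List.count_cons _ instBEqOfDecidableEq, @List.count_cons _ List.instBEq, ih]
    by_cases h : a = k
    · subst h; simp
    · simp [h]

-- the grouped product over distinct signatures equals the plain per-word product
theorem pv_group_eq (wordSet : List String) (L : List (List Char)) :
    ((PySem.List.dedup L).map (fun k => pvFac wordSet k ^ L.count k)).prod
      = (L.map (pvFac wordSet)).prod := by
  have htf : (PySem.List.dedup L).toFinset = L.toFinset := by
    ext x; simp
  rw [Finset.prod_list_map_count L (pvFac wordSet), ← htf,
    List.prod_toFinset _ (PySem.List.nodup_dedup L)]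
  refine congrArg List.prod (List.map_congr_left ?_)
  intro k _
  rw [pv_count_inst]

-- per-sentence agreement: A's per-word product equals B's grouped product
theorem pv_sentence_eq (wordSet : List String) (sentence : String) :
    (PySem.Str.split₀ sentence).foldl
      (fun v word =>
        if (PySem.Dict.counter (wordSet.map pvSig)).contains (pvSig word) then
          v * (PySem.Dict.counter (wordSet.map pvSig)).getD (pvSig word) 0 else v) 1
    = (PySem.Dict.counter ((PySem.Str.split₀ sentence).map pvSig)).items.foldl
        (fun prod p =>
          if pvMatches wordSet p.1 ≠ 0 then prod * pvMatches wordSet p.1 ^ p.2.toNat else prod) 1 := by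
  set L := (PySem.Str.split₀ sentence).map pvSig with hL
  -- left side: product of pvFac over all word signatures
  have hA : (PySem.Str.split₀ sentence).foldl
      (fun v word =>
        if (PySem.Dict.counter (wordSet.map pvSig)).contains (pvSig word) then
          v * (PySem.Dict.counter (wordSet.map pvSig)).getD (pvSig word) 0 else v) 1
      = (L.map (pvFac wordSet)).prod := by
    have hx : (PySem.Str.split₀ sentence).foldl
        (fun v word =>
          if (PySem.Dict.counter (wordSet.map pvSig)).contains (pvSig word) then
            v * (PySem.Dict.counter (wordSet.map pvSig)).getD (pvSig word) 0 else v) 1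
        = (PySem.Str.split₀ sentence).foldl
          (fun v word => v * pvFac wordSet (pvSig word)) 1 := by
      apply List.foldl_ext
      intro v word _
      exact pv_step_eq wordSet word v
    rw [hx, pv_foldl_mul (fun word => pvFac wordSet (pvSig word)) (PySem.Str.split₀ sentence) 1,
      one_mul, hL, List.map_map]
    rfl
  -- right side: product of pvFac^count over distinct signatures
  have hstep : ∀ p ∈ (PySem.List.dedup L).map (fun k => (k, (L.count k : Int))), ∀ (v : Int),
      (if pvMatches wordSet p.1 ≠ 0 then v * pvMatches wordSet p.1 ^ p.2.toNat else v)
      = v * (pvFac wordSet p.1 ^ p.2.toNat) := by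
    intro p _ v
    rw [pv_matches_eq]
    by_cases h : pvCntW wordSet p.1 = 0
    · simp [h, pvFac]
    · simp [h, pvFac]
  have hB : (PySem.Dict.counter L).items.foldl
      (fun prod p =>
        if pvMatches wordSet p.1 ≠ 0 then prod * pvMatches wordSet p.1 ^ p.2.toNat else prod) 1
      = ((PySem.List.dedup L).map (fun k => pvFac wordSet k ^ L.count k)).prod := by
    rw [PySem.Dict.items_counter, ← PySem.List.dedup_eq_ofList]
    rw [PySem.List.foldl_congr_mem' _ _ _ _ hstep]
    rw [pv_foldl_mul (fun p : List Char × Int => pvFac wordSet p.1 ^ p.2.toNat)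
      ((PySem.List.dedup L).map (fun k => (k, (L.count k : Int)))) 1, one_mul, List.map_map]
    refine congrArg List.prod (List.map_congr_left ?_)
    intro k _
    simp
  rw [hA, hB, pv_group_eq]

theorem countSentences_eq (wordSet sentences : List String) :
    countSentences wordSet sentences = countSentences_alt wordSet sentences := by
  simp only [countSentences, countSentences_alt]
  have hl := pv_loop
    (fun word => (wordSet.foldl (fun d word => d.insert (pvSig word) (d.getD (pvSig word) 0 + 1))
        (PySem.Dict.empty : PySem.Dict (List Char) Int)).contains (pvSig word))
    (fun word => (wordSet.foldl (fun d word => d.insert (pvSig word) (d.getD (pvSig word) 0 + 1))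
        (PySem.Dict.empty : PySem.Dict (List Char) Int)).getD (pvSig word) 0)
    sentences sentences.length [] (by simp)
  simp only [List.length_nil, Nat.cast_zero, List.nil_append, List.drop_zero] at hl
  rw [hl]
  have hr := pv_append_loop
    (fun sentence => (PySem.Dict.counter ((PySem.Str.split₀ sentence).map pvSig)).items.foldl
        (fun prod p =>
          if pvMatches wordSet p.1 ≠ 0 then prod * pvMatches wordSet p.1 ^ p.2.toNat else prod) 1)
    sentences []
  simp only [List.nil_append] at hr
  rw [show (fun (ans : List Int) sentence => ans ++
        [((PySem.Str.split₀ sentence).foldl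
            (fun d w => d.insert (pvSig w) (d.getD (pvSig w) 0 + 1))
            (PySem.Dict.empty : PySem.Dict (List Char) Int)).items.foldl
          (fun prod p =>
            if pvMatches wordSet p.1 ≠ 0 then prod * pvMatches wordSet p.1 ^ p.2.toNat else prod) 1])
      = (fun (ans : List Int) sentence => ans ++
        [(PySem.Dict.counter ((PySem.Str.split₀ sentence).map pvSig)).items.foldl
          (fun prod p =>
            if pvMatches wordSet p.1 ≠ 0 then prod * pvMatches wordSet p.1 ^ p.2.toNat else prod) 1])
      from by funext ans sentence; rw [pv_wm_eq], hr]
  apply List.map_congr_left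
  intro s _
  rw [pv_wm_eq wordSet]
  exact pv_sentence_eq wordSet s

-- ===== VERDICT (by name: the statement is the Claim_ definition above) =====
theorem countSentences_spec : Claim_equal_countSentences := by
  intro wordSet sentences _
  unfold Spec_countSentences
  exact countSentences_eq wordSet sentences
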